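-- pv_equiv track=rewrite | github.com/olsenw/LeetCodeExercises | Python3/greatest_sum_divisible_by_three.py | maxSumDivThree_fail
-- ===== SOURCE A (Python) =====
-- from typing import List, Dict, Set, Optional
--
-- def maxSumDivThree_fail(nums: List[int]) -> int:
--     one = []
--     two = []
--     answer = 0
--     for n in nums:
--         if n % 3 == 1:
--             one.append(n)
--         elif n % 3 == 2:
--             two.append(n)
--         else:
--             answer += n
--     one.sort(reverse=True)
--     two.sort(reverse=True)
--     l = min(len(one), len(two))
--     return answer + sum(one[:l]) + sum(two[:l])
-- ===== SOURCE B (Python) =====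
-- from typing import List
--
-- def maxSumDivThree_fail(nums: List[int]) -> int:
--     one = [n for n in nums if n % 3 == 1]
--     two = [n for n in nums if n % 3 == 2]
--     base = sum(n for n in nums if n % 3 == 0)
--     k = len(one) - len(two)
--     longer, shorter = (one, two) if k > 0 else (two, one)
--     dropped = sorted(longer)[:abs(k)]
--     return base + sum(shorter) + sum(longer) - sum(dropped)
-- ===== Notes on version B (the rewrite author's own statement) =====
-- stated objective: alternative
-- what changed: Instead of sorting both remainder classes descending and summing length-l prefixes, B sums everything and subtracts the |len(one)-len(two)| smallest elements of the longer class, found by a single ascending sort of that one list.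
import Mathlib
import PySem

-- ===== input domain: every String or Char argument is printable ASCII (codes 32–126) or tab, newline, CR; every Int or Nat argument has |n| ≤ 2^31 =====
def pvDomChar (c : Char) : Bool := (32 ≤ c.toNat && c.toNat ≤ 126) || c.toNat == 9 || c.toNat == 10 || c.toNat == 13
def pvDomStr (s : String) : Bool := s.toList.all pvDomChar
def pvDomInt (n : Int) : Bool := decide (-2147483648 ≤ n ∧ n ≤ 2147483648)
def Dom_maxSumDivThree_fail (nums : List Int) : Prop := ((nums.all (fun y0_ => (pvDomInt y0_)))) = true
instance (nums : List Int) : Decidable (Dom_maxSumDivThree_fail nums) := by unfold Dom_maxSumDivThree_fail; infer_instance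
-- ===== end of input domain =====

-- B replaces A's two descending sorts + prefix sums by summing everything and
-- subtracting the |len(one)-len(two)| smallest elements of the longer class
-- (one ascending sort of that single list); objective: alternative decomposition.

-- ===== PORT A =====
def maxSumDivThree_fail (nums : List Int) : Int :=
  let s := nums.foldl (fun (st : List Int × List Int × Int) n =>
    if PySem.Int.mod n 3 == 1 then (st.1 ++ [n], st.2.1, st.2.2)
    else if PySem.Int.mod n 3 == 2 then (st.1, st.2.1 ++ [n], st.2.2)
    else (st.1, st.2.1, st.2.2 + n)) ([], [], 0)
  let one := PySem.List.sorted s.1 (fun x => x) true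
  let two := PySem.List.sorted s.2.1 (fun x => x) true
  let l : Int := min (one.length : Int) (two.length : Int)
  s.2.2 + (PySem.List.slice one none (some l)).sum + (PySem.List.slice two none (some l)).sum

-- ===== PORT B =====
def maxSumDivThree_fail_alt (nums : List Int) : Int :=
  let one := nums.filter (fun n => PySem.Int.mod n 3 == 1)
  let two := nums.filter (fun n => PySem.Int.mod n 3 == 2)
  let base := (nums.filter (fun n => PySem.Int.mod n 3 == 0)).sum
  let k : Int := (one.length : Int) - (two.length : Int)
  let p := if k > 0 then (one, two) else (two, one)
  let dropped := (PySem.List.sorted p.1 (fun x => x) false).take k.natAbs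
  base + p.2.sum + p.1.sum - dropped.sum

-- ===== PRECONDITION & SPEC =====
def Spec_maxSumDivThree_fail (nums : List Int) (out : Int) : Prop := out = maxSumDivThree_fail_alt nums
instance (nums : List Int) (out : Int) : Decidable (Spec_maxSumDivThree_fail nums out) := by unfold Spec_maxSumDivThree_fail; infer_instance

-- ===== CLAIM (what is proved, stated in full; the proofs are below) =====
def Claim_equal_maxSumDivThree_fail : Prop := ∀ (nums : List Int), Dom_maxSumDivThree_fail nums → Spec_maxSumDivThree_fail nums (maxSumDivThree_fail nums)

-- ===== LEMMAS AND PROOFS =====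

-- A's partition loop, characterised by filters.
theorem foldA_eq (nums : List Int) (o t : List Int) (a : Int) :
    nums.foldl (fun (st : List Int × List Int × Int) n =>
      if PySem.Int.mod n 3 == 1 then (st.1 ++ [n], st.2.1, st.2.2)
      else if PySem.Int.mod n 3 == 2 then (st.1, st.2.1 ++ [n], st.2.2)
      else (st.1, st.2.1, st.2.2 + n)) (o, t, a)
    = (o ++ nums.filter (fun n => PySem.Int.mod n 3 == 1),
       t ++ nums.filter (fun n => PySem.Int.mod n 3 == 2),
       a + (nums.filter (fun n => PySem.Int.mod n 3 == 0)).sum) := by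
  induction nums generalizing o t a with
  | nil => simp
  | cons x xs ih =>
    have hme : PySem.Int.mod x 3 = x % 3 :=
      PySem.Int.mod_eq_emod_of_pos (a := x) (b := 3) (by norm_num)
    have hx : x % 3 = 0 ∨ x % 3 = 1 ∨ x % 3 = 2 := by omega
    rw [List.foldl_cons]
    rcases hx with h | h | h
    · simp only [hme, h, show ((0:Int)==1) = false from rfl, show ((0:Int)==2) = false from rfl,
        Bool.false_eq_true, if_false]
      rw [ih]
      simp [h, add_assoc]
    · simp only [hme, h, show ((1:Int)==1) = true from rfl, if_true]
      rw [ih]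
      simp [h]
    · simp only [hme, h, show ((2:Int)==1) = false from rfl, show ((2:Int)==2) = true from rfl,
        Bool.false_eq_true, if_false, if_true]
      rw [ih]
      simp [h]

-- Sum of the first l of the descending sort = total minus the (length - l) smallest.
theorem take_sorted_desc_sum (xs : List Int) (l : Nat) (hl : l ≤ xs.length) :
    ((PySem.List.sorted xs (fun x => x) true).take l).sum
      = xs.sum - ((PySem.List.sorted xs (fun x => x) false).take (xs.length - l)).sum := by
  set d := PySem.List.sorted xs (fun x => x) true with hd
  have hperm : d.Perm xs := PySem.List.sorted_perm xs _ _
  have hlen : d.length = xs.length := hperm.length_eq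
  have hasc : PySem.List.sorted xs (fun x => x) false = d.reverse := by
    apply PySem.List.sorted_id_eq_of_perm_of_pairwise
    · exact d.reverse_perm.trans hperm
    · rw [List.pairwise_reverse]
      exact PySem.List.sorted_pairwise_rev xs (fun x => x)
  rw [hasc, List.take_reverse]
  have hdl : d.length - (xs.length - l) = l := by omega
  rw [hdl, List.sum_reverse]
  have := List.sum_take_add_sum_drop d l
  have hsum : d.sum = xs.sum := hperm.sum_eq
  omega

-- ===== VERDICT (by name: the statement is the Claim_ definition above) =====
theorem maxSumDivThree_fail_spec : Claim_equal_maxSumDivThree_fail := by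
  intro nums _
  unfold Spec_maxSumDivThree_fail maxSumDivThree_fail maxSumDivThree_fail_alt
  simp only [foldA_eq, List.nil_append]
  set f1 := nums.filter (fun n => PySem.Int.mod n 3 == 1) with hf1
  set f2 := nums.filter (fun n => PySem.Int.mod n 3 == 2) with hf2
  set f0 := nums.filter (fun n => PySem.Int.mod n 3 == 0) with hf0
  set n1 := f1.length with hn1
  set n2 := f2.length with hn2
  have hl1 : (PySem.List.sorted f1 (fun x => x) true).length = n1 :=
    (PySem.List.sorted_perm f1 _ _).length_eq
  have hl2 : (PySem.List.sorted f2 (fun x => x) true).length = n2 :=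
    (PySem.List.sorted_perm f2 _ _).length_eq
  have hmin : (0:Int) ≤ min ((PySem.List.sorted f1 (fun x => x) true).length : Int)
      ((PySem.List.sorted f2 (fun x => x) true).length : Int) := by positivity
  rw [PySem.List.slice_to _ hmin, PySem.List.slice_to _ hmin]
  have htn : (min ((PySem.List.sorted f1 (fun x => x) true).length : Int)
      ((PySem.List.sorted f2 (fun x => x) true).length : Int)).toNat = min n1 n2 := by
    rw [hl1, hl2]; omega
  rw [htn]
  by_cases h : ((n1 : Int) - (n2 : Int)) > 0
  · -- one is longer: min = n2, B drops from one
    have hmn : min n1 n2 = n2 := by omega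
    rw [hmn]
    have hfull : (List.take n2 (PySem.List.sorted f2 (fun x => x) true)).sum = f2.sum := by
      rw [← hl2, List.take_length]
      exact (PySem.List.sorted_perm f2 _ _).sum_eq
    have habs : ((n1 : Int) - (n2 : Int)).natAbs = n1 - n2 := by omega
    rw [hfull, take_sorted_desc_sum f1 n2 (by omega), if_pos h, habs]
    ring
  · -- two is at least as long: min = n1, B drops from two
    have hmn : min n1 n2 = n1 := by omega
    rw [hmn]
    have hfull : (List.take n1 (PySem.List.sorted f1 (fun x => x) true)).sum = f1.sum := by
      rw [← hl1, List.take_length]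
      exact (PySem.List.sorted_perm f1 _ _).sum_eq
    have habs : ((n1 : Int) - (n2 : Int)).natAbs = n2 - n1 := by omega
    rw [hfull, take_sorted_desc_sum f2 n1 (by omega), if_neg h, habs]
    ring
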